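-- pv_equiv track=rewrite | github.com/athoney/aoc | 2025/d02/code.py | check_if_valid
-- ===== SOURCE A (Python) =====
-- from collections import Counter
--
-- def check_if_valid(value):
--     """
--     an ID is invalid if it is made only of some
--     sequence of digits repeated at least twice.
--     """
--     freq = Counter(value).values()
--     smallest_freq = sorted(freq)[0]
--
--     if smallest_freq < 2:
--         return False
--
--     n = len(value) // smallest_freq
--     chunks = [value[i:i + n] for i in range(0, len(value), n)]
--
--     return len(set(chunks)) == 1
-- ===== SOURCE B (Python) =====
-- def check_if_valid(value):
--     """
--     an ID is invalid if it is made only of some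
--     sequence of digits repeated at least twice.
--     """
--     s = sorted(value)
--     smallest = len(s)
--     run = 1
--     for i in range(1, len(s)):
--         if s[i] == s[i - 1]:
--             run += 1
--         else:
--             smallest = min(smallest, run)
--             run = 1
--     smallest = min(smallest, run)
--
--     if smallest < 2:
--         return False
--
--     n = len(value) // smallest
--     if len(value) % n != 0:
--         return False
--     return all(value[i] == value[i - n] for i in range(n, len(value)))
-- ===== Notes on version B (the rewrite author's own statement) =====
-- stated objective: alternative
-- what changed: B finds the smallest character frequency by sorting the string and scanning adjacent-equal runs (no Counter/hash map), and replaces A's chunk-list-plus-set-dedup test by a divisibility check plus a pointwise shift-periodicity comparison value[i] == value[i-n].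
import Mathlib
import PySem

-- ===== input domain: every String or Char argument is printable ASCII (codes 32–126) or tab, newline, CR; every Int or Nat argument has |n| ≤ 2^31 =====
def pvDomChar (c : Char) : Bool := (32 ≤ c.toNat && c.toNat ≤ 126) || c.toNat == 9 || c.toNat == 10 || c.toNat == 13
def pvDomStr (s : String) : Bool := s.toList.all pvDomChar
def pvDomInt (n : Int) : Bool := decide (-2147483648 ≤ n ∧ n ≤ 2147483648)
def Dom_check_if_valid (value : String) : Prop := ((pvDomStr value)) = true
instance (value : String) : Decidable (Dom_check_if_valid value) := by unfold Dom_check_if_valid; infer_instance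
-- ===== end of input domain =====

-- B sorts the string and scans runs to find the smallest character frequency (no Counter),
-- then checks divisibility plus a pointwise shift-periodicity test instead of slicing into
-- chunks and deduplicating with a set (alternative decomposition, similar cost).


-- ===== PORT A =====
def check_if_valid (value : String) : Bool :=
  let freq := (PySem.Dict.counter value.toList).values
  match PySem.List.pyGet? (PySem.List.sorted freq (fun x => x) false) 0 with
  | none => false  -- sorted(freq)[0] raises IndexError (empty value); excluded by Pre_
  | some smallest_freq =>
    if smallest_freq < 2 then false
    else
      let n := PySem.Int.floordiv (PySem.Str.len value) smallest_freq
      let chunks := (PySem.List.pyRange 0 (PySem.Str.len value) n).map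
        (fun i => PySem.List.slice value.toList (some i) (some (i + n)))
      PySem.Set.len (PySem.Set.ofList chunks) == 1

-- ===== PORT B =====
-- Source B's for-loop over i in range(1, len(s)) comparing s[i] with s[i-1], carrying
-- (smallest, run); the trailing min(smallest, run) of Source B is the base case here
def scanRuns : Int → Int → List Char → Int
  | smallest, run, [] => min smallest run
  | smallest, run, [_] => min smallest run
  | smallest, run, a :: b :: t =>
      if b = a then scanRuns smallest (run + 1) (b :: t)
      else scanRuns (min smallest run) 1 (b :: t)

def check_if_valid_alt (value : String) : Bool :=
  let s := PySem.List.sorted value.toList (fun c => c) false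
  let smallest := scanRuns ((s.length : Int)) 1 s
  if smallest < 2 then false
  else
    let n := PySem.Int.floordiv (PySem.Str.len value) smallest
    if PySem.Int.mod (PySem.Str.len value) n != 0 then false
    else (PySem.List.pyRange n (PySem.Str.len value) 1).all
      (fun i => PySem.List.pyGet? value.toList i == PySem.List.pyGet? value.toList (i - n))

-- ===== PRECONDITION & SPEC =====
-- Pre_ excludes only the empty string, where A raises IndexError.
def Pre_check_if_valid (value : String) : Prop := value.toList ≠ []
instance (value : String) : Decidable (Pre_check_if_valid value) := by unfold Pre_check_if_valid; infer_instance
def pvWitness_check_if_valid : String := "abab"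

def Spec_check_if_valid (value : String) (out : Bool) : Prop := out = check_if_valid_alt value
instance (value : String) (out : Bool) : Decidable (Spec_check_if_valid value out) := by unfold Spec_check_if_valid; infer_instance

-- ===== CLAIM (what is proved, stated in full; the proofs are below) =====
def Claim_equal_check_if_valid : Prop := ∀ (value : String), Dom_check_if_valid value → Pre_check_if_valid value → Spec_check_if_valid value (check_if_valid value)

-- ===== LEMMAS AND PROOFS =====

-- Counter(value).values() lists, per first occurrence, the count of each distinct char.
lemma counter_values_eq (s : List Char) :
    (PySem.Dict.counter s).values = (PySem.Set.ofList s).map (fun c => (s.count c : Int)) := by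
  rw [PySem.Dict.values_eq_map_keys _ (PySem.Dict.nodup_keys_counter s) 0,
      PySem.Dict.keys_counter]
  exact List.map_congr_left (fun c _ => PySem.Dict.getD_counter s c)

lemma sorted_head_eq_min (xs : List Int) (h : xs ≠ []) :
    PySem.List.pyGet? (PySem.List.sorted xs (fun x => x) false) 0
      = PySem.List.min? xs (fun x => x) := by
  cases hys : PySem.List.sorted xs (fun x => x) false with
  | nil => exact absurd ((PySem.List.sorted_eq_nil_iff xs _ false).mp hys) h
  | cons y t =>
    rw [PySem.List.pyGet?_zero_cons]
    cases hmin : PySem.List.min? xs (fun x => x) with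
    | none => exact absurd ((PySem.List.min?_eq_none_iff xs _).mp hmin) h
    | some m =>
      have hperm : (y :: t).Perm xs := by rw [← hys]; exact PySem.List.sorted_perm xs _ false
      have hy : y ∈ xs := hperm.mem_iff.mp (List.mem_cons_self)
      have hmy : m ≤ y := PySem.List.min?_isMin hmin y hy
      have hm_mem : m ∈ (y :: t) := hperm.mem_iff.mpr (PySem.List.min?_mem hmin)
      obtain ⟨i, hi, hgi⟩ := List.getElem_of_mem hm_mem
      have hmono := PySem.List.sorted_id_getElem_mono xs (p := 0) (q := i) (Nat.zero_le i)
        (by rw [hys]; exact hi)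
      simp only [hys] at hmono
      rw [List.getElem_cons_zero] at hmono
      rw [hgi] at hmono
      exact congrArg some (le_antisymm hmono hmy)

lemma foldl_add_length_le {α : Type} [BEq α] (rest : List α) (acc : PySem.Set α) :
    acc.length ≤ (rest.foldl PySem.Set.add acc).length := by
  induction rest generalizing acc with
  | nil => simp
  | cons x t ih =>
    refine le_trans ?_ (ih (PySem.Set.add acc x))
    simp only [PySem.Set.add]
    split <;> simp

lemma set_singleton_iff {α : Type} [BEq α] [LawfulBEq α] (c : α) (rest : List α) :
    (PySem.Set.ofList (c :: rest)).length = 1 ↔ ∀ x ∈ rest, x = c := by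
  have h0 : PySem.Set.ofList (c :: rest) = rest.foldl PySem.Set.add [c] := by
    simp [PySem.Set.ofList, PySem.Set.add, PySem.Set.empty, PySem.Set.contains]
  rw [h0]; clear h0
  induction rest with
  | nil => simp
  | cons x t ih =>
    by_cases hx : x = c
    · subst hx
      have : PySem.Set.add [x] x = [x] := by simp [PySem.Set.add, PySem.Set.contains]
      rw [List.foldl_cons, this]
      exact ih.trans (by simp)
    · have hadd : PySem.Set.add [c] x = [c, x] := by
        simp [PySem.Set.add, PySem.Set.contains, hx]
      rw [List.foldl_cons, hadd]
      have h2 := foldl_add_length_le t [c, x]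
      simp only [List.length_cons, List.length_nil] at h2
      constructor
      · intro h; omega
      · intro h; exact absurd (h x (List.mem_cons_self)) hx

-- the run lengths Source B's loop walks through, as a list (proof device)
def runLens : Int → List Char → List Int
  | run, [] => [run]
  | run, [_] => [run]
  | run, a :: b :: t => if b = a then runLens (run + 1) (b :: t) else run :: runLens 1 (b :: t)

lemma scanRuns_eq_foldl : ∀ (l : List Char) (sm run : Int),
    scanRuns sm run l = (runLens run l).foldl min sm
  | [], sm, run => by simp [scanRuns, runLens]
  | [a], sm, run => by simp [scanRuns, runLens]
  | a :: b :: t, sm, run => by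
    by_cases h : b = a
    · simp only [scanRuns, runLens, if_pos h]
      exact scanRuns_eq_foldl (b :: t) sm (run + 1)
    · simp only [scanRuns, runLens, if_neg h, List.foldl_cons]
      exact scanRuns_eq_foldl (b :: t) (min sm run) 1

lemma runLens_cons (a : Char) (l : List Char) (run : Int)
    (hs : (a :: l).Pairwise (· ≤ ·)) :
    runLens run (a :: l) = (run + (l.count a : Int)) ::
      (if l.dropWhile (fun x => a == x) = [] then []
       else runLens 1 (l.dropWhile (fun x => a == x))) := by
  induction l generalizing a run with
  | nil => simp [runLens]
  | cons b t ih =>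
    by_cases hba : b = a
    · subst hba
      have hs' : (b :: t).Pairwise (· ≤ ·) := hs.sublist (List.sublist_cons_self _ _)
      rw [runLens, if_pos rfl, ih b (run + 1) hs']
      simp only [List.dropWhile_cons, beq_self_eq_true, if_pos, List.count_cons]
      congr 1
      push_cast
      ring
    · have hab : (a == b) = false := by
        simp only [beq_eq_false_iff_ne, ne_eq]
        exact fun h => hba h.symm
      have hcount : t.count a = 0 := by
        rw [List.count_eq_zero]
        intro hmem
        have h1 : a ≤ b := (List.pairwise_cons.mp hs).1 b List.mem_cons_self
        have h2 : b ≤ a :=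
          (List.pairwise_cons.mp ((List.pairwise_cons.mp hs).2)).1 a hmem
        exact hba (le_antisymm h2 h1)
      rw [runLens, if_neg hba]
      simp [hab, hba, hcount]

-- on a sorted list, every run length is a count and every count is a run length
lemma runLens_counts : ∀ (N : Nat) (l : List Char), l.length ≤ N → l.Pairwise (· ≤ ·) → l ≠ [] →
    (∀ x ∈ runLens 1 l, ∃ c ∈ l, (l.count c : Int) = x) ∧
    (∀ c ∈ l, (l.count c : Int) ∈ runLens 1 l) := by
  intro N
  induction N with
  | zero =>
    intro l hl _ hne
    have : l = [] := List.length_eq_zero_iff.mp (Nat.le_zero.mp hl)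
    exact absurd this hne
  | succ N ih =>
    intro l hl hs hne
    obtain ⟨a, t, rfl⟩ := List.exists_cons_of_ne_nil hne
    set l' := t.dropWhile (fun x => a == x) with hl'
    have hsub : l' ⊆ t := (List.dropWhile_sublist _).subset
    have hs_t : t.Pairwise (· ≤ ·) := hs.sublist (List.sublist_cons_self _ _)
    have hs' : l'.Pairwise (· ≤ ·) := hs_t.sublist (List.dropWhile_sublist _)
    have hl'len : l'.length ≤ N := by
      have := (List.dropWhile_sublist (l := t) (fun x => a == x)).length_le
      simp only [List.length_cons] at hl
      rw [← hl'] at this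
      omega
    have hne_a : ∀ c ∈ l', c ≠ a := by
      cases hcl' : l' with
      | nil => intro c hc; exact absurd hc List.not_mem_nil
      | cons h0 t0 =>
        have hh0 : (a == h0) = false := by
          have := List.head?_dropWhile_not (fun x => a == x) t
          rw [← hl', hcl'] at this
          simpa using this
        have hh0a : h0 ≠ a := by
          intro h; rw [h] at hh0; simp at hh0
        have hah0 : a ≤ h0 :=
          (List.pairwise_cons.mp hs).1 h0 (hsub (hcl' ▸ List.mem_cons_self))
        intro c hc hca
        subst hca
        rcases List.mem_cons.mp hc with h | h
        · exact hh0a h.symm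
        · have hs'' : (h0 :: t0).Pairwise (· ≤ ·) := hcl' ▸ hs'
          have hle : h0 ≤ c := (List.pairwise_cons.mp hs'').1 c h
          exact hh0a (le_antisymm hle hah0)
    have htw : ∀ x ∈ t.takeWhile (fun x => a == x), x = a := by
      intro x hx
      have h := List.mem_takeWhile_imp hx
      simp only [beq_iff_eq] at h
      exact h.symm
    have hsplit : t.takeWhile (fun x => a == x) ++ l' = t :=
      List.takeWhile_append_dropWhile
    have hcount_eq : ∀ c ∈ l', (a :: t).count c = l'.count c := by
      intro c hc
      have hca : c ≠ a := hne_a c hc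
      have h1 : (t.takeWhile (fun x => a == x)).count c = 0 := by
        rw [List.count_eq_zero]
        intro hm
        exact hca (htw c hm)
      calc (a :: t).count c = t.count c + if (a == c) = true then 1 else 0 :=
            List.count_cons
        _ = t.count c := by
            have hac : (a == c) = false := beq_eq_false_iff_ne.mpr (fun h => hca h.symm)
            rw [hac]
            simp
        _ = (t.takeWhile (fun x => a == x) ++ l').count c := by rw [hsplit]
        _ = (t.takeWhile (fun x => a == x)).count c + l'.count c := List.count_append
        _ = l'.count c := by rw [h1]; ring
    have hmem_l' : ∀ c ∈ t, c ≠ a → c ∈ l' := by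
      intro c hc hca
      rw [← hsplit] at hc
      rcases List.mem_append.mp hc with h | h
      · exact absurd (htw c h) hca
      · exact h
    have hhead : ((a :: t).count a : Int) = 1 + (t.count a : Int) := by
      rw [List.count_cons]
      simp
      omega
    rw [runLens_cons a t 1 hs, ← hl']
    constructor
    · intro x hx
      rcases List.mem_cons.mp hx with rfl | hx'
      · exact ⟨a, List.mem_cons_self, hhead⟩
      · by_cases hl'nil : l' = []
        · rw [if_pos hl'nil] at hx'
          exact absurd hx' List.not_mem_nil
        · rw [if_neg hl'nil] at hx'
          obtain ⟨c, hc, hcx⟩ := (ih l' hl'len hs' hl'nil).1 x hx'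
          refine ⟨c, List.mem_cons_of_mem a (hsub hc), ?_⟩
          rw [hcount_eq c hc]
          exact hcx
    · intro c hc
      by_cases hca : c = a
      · subst hca
        rw [hhead]
        exact List.mem_cons_self
      · have hct : c ∈ t := by
          rcases List.mem_cons.mp hc with h | h
          · exact absurd h hca
          · exact h
        have hcl' : c ∈ l' := hmem_l' c hct hca
        have hl'ne : l' ≠ [] := fun h => absurd (h ▸ hcl') List.not_mem_nil
        rw [hcount_eq c hcl', if_neg hl'ne]
        exact List.mem_cons_of_mem _ ((ih l' hl'len hs' hl'ne).2 c hcl')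

lemma foldl_min_eq (m : Int) : ∀ (L : List Int) (init : Int),
    (∀ x ∈ L, m ≤ x) → m ≤ init → (m ∈ L ∨ init = m) → L.foldl min init = m := by
  intro L
  induction L with
  | nil =>
    intro init _ _ hmem
    rcases hmem with h | h
    · exact absurd h List.not_mem_nil
    · exact h
  | cons x t ih =>
    intro init hle hinit hmem
    rw [List.foldl_cons]
    have hx : m ≤ x := hle x List.mem_cons_self
    refine ih (min init x) (fun y hy => hle y (List.mem_cons_of_mem _ hy)) (le_min hinit hx) ?_
    rcases hmem with h | h
    · rcases List.mem_cons.mp h with rfl | h'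
      · right; omega
      · left; exact h'
    · right; omega

-- B's run scan over the sorted string computes the minimum character frequency
lemma scanRuns_eq_min (s : List Char) (m : Int)
    (hmin : PySem.List.min? ((PySem.Set.ofList s).map (fun c => (s.count c : Int)))
      (fun x => x) = some m) :
    scanRuns (((PySem.List.sorted s (fun c => c) false).length : Nat) : Int) 1
      (PySem.List.sorted s (fun c => c) false) = m := by
  set s' := PySem.List.sorted s (fun c => c) false with hs'def
  have hperm : s'.Perm s := PySem.List.sorted_perm s _ false
  have hcount : ∀ c, s'.count c = s.count c := fun c => hperm.count_eq c
  have hpair : s'.Pairwise (· ≤ ·) := by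
    have := PySem.List.sorted_pairwise s (fun c : Char => c)
    simpa using this
  obtain ⟨c0, hc0set, hc0⟩ := List.exists_of_mem_map (PySem.List.min?_mem hmin)
  have hc0s : c0 ∈ s := (PySem.Set.mem_ofList s c0).mp hc0set
  have hs'ne : s' ≠ [] := by
    intro h
    exact absurd (hperm.mem_iff.mpr hc0s) (h ▸ List.not_mem_nil)
  rw [scanRuns_eq_foldl]
  obtain ⟨hG1, hG2⟩ := runLens_counts s'.length s' le_rfl hpair hs'ne
  apply foldl_min_eq
  · intro x hx
    obtain ⟨c, hc, hcx⟩ := hG1 x hx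
    have hcs : c ∈ s := hperm.mem_iff.mp hc
    have hmem : (s.count c : Int) ∈ (PySem.Set.ofList s).map (fun c => (s.count c : Int)) :=
      List.mem_map_of_mem ((PySem.Set.mem_ofList s c).mpr hcs)
    have := PySem.List.min?_isMin hmin _ hmem
    rw [← hcx, hcount c]
    exact this
  · have : m = (s.count c0 : Int) := hc0.symm
    rw [this]
    have h1 : s.count c0 ≤ s.length := List.count_le_length
    have h2 : s'.length = s.length := hperm.length_eq
    rw [h2]
    exact_mod_cast h1
  · left
    have := hG2 c0 (hperm.mem_iff.mpr hc0s)
    rw [hcount c0, hc0] at this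
    exact this

-- chunk k of the string equals the leading chunk, for all k, iff the string is N-shift-periodic
lemma shift_iff_chunks (s : List Char) (N q : Nat) (h1 : 1 ≤ N) (hL : s.length = q * N) :
    (∀ i : Nat, N ≤ i → i < s.length → s[i]? = s[i - N]?) ↔
    (∀ k < q, (s.drop (N * k)).take N = s.take N) := by
  have hchunk? : ∀ k j : Nat,
      ((s.drop (N * k)).take N)[j]? = if j < N then s[N * k + j]? else none := by
    intro k j
    rw [List.getElem?_take, List.getElem?_drop]
  constructor
  · intro hshift k hk
    induction k with
    | zero => simp
    | succ k ihk =>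
      have hk' : k < q := by omega
      have hIH := ihk hk'
      apply List.ext_getElem?
      intro j
      rw [hchunk?, List.getElem?_take]
      by_cases hjN : j < N
      · rw [if_pos hjN, if_pos hjN]
        have hbound : N * (k + 1) + j < s.length := by
          rw [hL]
          calc N * (k + 1) + j < N * (k + 1) + N := by omega
            _ = (k + 2) * N := by ring
            _ ≤ q * N := Nat.mul_le_mul_right N (by omega)
        have hNle : N ≤ N * (k + 1) + j := by
          have : N ≤ N * (k + 1) := Nat.le_mul_of_pos_right N (by omega)
          omega
        have hstep := hshift (N * (k + 1) + j) hNle hbound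
        have hidx : N * (k + 1) + j - N = N * k + j := by
          have : N * (k + 1) = N * k + N := by ring
          omega
        rw [hidx] at hstep
        rw [hstep]
        have h5 := hchunk? k j
        rw [if_pos hjN] at h5
        rw [← h5, hIH, List.getElem?_take_of_lt hjN]
      · rw [if_neg hjN, if_neg hjN]
  · intro hchunks i hiN hiL
    have hNpos : 0 < N := h1
    have hj : i % N < N := Nat.mod_lt _ hNpos
    have hk : i / N < q := by
      have h6 : i < q * N := hL ▸ hiL
      exact Nat.div_lt_of_lt_mul (by rwa [Nat.mul_comm] at h6)
    have hk1 : 1 ≤ i / N := (Nat.one_le_div_iff hNpos).mpr hiN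
    have hgen : ∀ k, k < q → s[N * k + i % N]? = s[i % N]? := by
      intro k hkq
      have h5 := hchunk? k (i % N)
      rw [if_pos hj, hchunks k hkq, List.getElem?_take_of_lt hj] at h5
      exact h5.symm
    have e1 : N * (i / N) + i % N = i := Nat.div_add_mod i N
    have e2 : N * (i / N - 1) + i % N = i - N := by
      have h4 : N * (i / N) = N * (i / N - 1) + N := by
        calc N * (i / N) = N * ((i / N - 1) + 1) := by rw [Nat.sub_add_cancel hk1]
          _ = N * (i / N - 1) + N := by ring
      omega
    calc s[i]? = s[N * (i / N) + i % N]? := by rw [e1]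
      _ = s[i % N]? := hgen _ hk
      _ = s[N * (i / N - 1) + i % N]? := (hgen _ (by omega)).symm
      _ = s[i - N]? := by rw [e2]

-- A's chunk/set test equals B's divisibility + shift test
lemma tail_eq (s : List Char) (N : Nat) (h1 : 1 ≤ N) (h2 : N ≤ s.length) :
    (PySem.Set.len (PySem.Set.ofList ((PySem.List.pyRange 0 (s.length : Int) (N : Int)).map
        (fun i => PySem.List.slice s (some i) (some (i + (N : Int)))))) == 1)
    = (if (PySem.Int.mod (s.length : Int) (N : Int) != 0) = true then false
       else (PySem.List.pyRange (N : Int) (s.length : Int) 1).all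
         (fun i => PySem.List.pyGet? s i == PySem.List.pyGet? s (i - (N : Int)))) := by
  have hLpos : 1 ≤ s.length := le_trans h1 h2
  obtain ⟨q, r, hdm, hrlt⟩ : ∃ q r, N * q + r = s.length ∧ r < N :=
    ⟨s.length / N, s.length % N, Nat.div_add_mod s.length N, Nat.mod_lt _ (by omega)⟩
  have hq1 : 1 ≤ q := by
    rcases Nat.eq_zero_or_pos q with h | h
    · rw [h, Nat.mul_zero] at hdm; omega
    · exact h
  have hcomm : N * q = q * N := Nat.mul_comm N q
  have he2 : (q + 1) * N = N * q + N := by ring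
  have he3 : (q + 1 + 1) * N = N * q + N + N := by ring
  -- A side: normalize the range
  have hNpos : (0 : Int) < (N : Int) := by exact_mod_cast h1
  rw [PySem.List.pyRange_of_pos 0 (s.length : Int) hNpos]
  have hifpos : (0 : Int) < (s.length : Int) := by exact_mod_cast hLpos
  rw [if_pos hifpos]
  have hCcast : (((s.length : Int) - 0 + (N : Int) - 1) / (N : Int)).toNat
      = (s.length + N - 1) / N := by
    have e : ((s.length : Int) - 0 + (N : Int) - 1) = ((s.length + N - 1 : Nat) : Int) := by
      omega
    rw [e, ← Int.natCast_div, Int.toNat_natCast]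
  rw [hCcast]
  have hCq : (s.length + N - 1) / N = q + (if r = 0 then 0 else 1) := by
    rcases Nat.eq_zero_or_pos r with h0 | h0
    · rw [if_pos h0, Nat.add_zero]
      exact Nat.div_eq_of_lt_le (by omega) (by omega)
    · rw [if_neg (by omega)]
      exact Nat.div_eq_of_lt_le (by omega) (by omega)
  rw [hCq]
  have hmap1 : (List.range (q + if r = 0 then 0 else 1)).map (fun k => (0 : Int) + (N : Int) * (k : Nat))
      = (List.range (q + if r = 0 then 0 else 1)).map (fun k => ((N * k : Nat) : Int)) := by
    apply List.map_congr_left; intro k _; push_cast; ring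
  rw [hmap1, List.map_map]
  have hmap2 : ((List.range (q + if r = 0 then 0 else 1)).map
      ((fun i => PySem.List.slice s (some i) (some (i + (N : Int)))) ∘ (fun k => ((N * k : Nat) : Int))))
      = (List.range (q + if r = 0 then 0 else 1)).map (fun k => (s.drop (N * k)).take N) := by
    apply List.map_congr_left; intro k _
    simp only [Function.comp]
    rw [PySem.List.slice_natCast_add]
  rw [hmap2]
  -- peel the head chunk
  obtain ⟨C', hC'⟩ : ∃ C', q + (if r = 0 then 0 else 1) = C' + 1 :=
    ⟨q + (if r = 0 then 0 else 1) - 1, by split <;> omega⟩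
  rw [hC', List.range_succ_eq_map, List.map_cons]
  have hhead : (s.drop (N * 0)).take N = s.take N := by simp
  rw [hhead, List.map_map]
  -- B side: the mod test
  have hmodcast : PySem.Int.mod (s.length : Int) (N : Int) = ((s.length % N : Nat) : Int) :=
    PySem.Int.mod_natCast s.length N
  have hr_eq : s.length % N = r := by
    rw [← hdm, Nat.mul_comm N q, Nat.add_comm, Nat.add_mul_mod_self_right]
    exact Nat.mod_eq_of_lt hrlt
  rw [hmodcast, hr_eq]
  -- turn both Bools into decided Props
  rw [Bool.eq_iff_iff]
  simp only [PySem.Set.len, beq_iff_eq, Nat.cast_eq_one]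
  rw [set_singleton_iff]
  have htk : (s.take N).length = N := by rw [List.length_take]; omega
  have hmem : (∀ x ∈ (List.range C').map ((fun k => (s.drop (N * k)).take N) ∘ Nat.succ),
      x = s.take N) ↔ (∀ k < C' + 1, (s.drop (N * k)).take N = s.take N) := by
    constructor
    · intro h k hk
      cases k with
      | zero => exact hhead
      | succ k =>
        exact h _ (List.mem_map_of_mem (by exact List.mem_range.mpr (by omega)))
    · intro h x hx
      obtain ⟨k, hk, rfl⟩ := List.mem_map.mp hx
      exact h (k + 1) (by simpa using List.mem_range.mp hk)
  rw [hmem, ← hC']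
  rcases Nat.eq_zero_or_pos r with h0 | h0
  · -- r = 0 : divisible; chunks ↔ shift test
    subst h0
    rw [show (q + if (0 : Nat) = 0 then 0 else 1) = q by norm_num,
      show ((((0 : Nat) : Int)) != 0) = false by decide]
    simp only [Bool.false_eq_true, if_false]
    rw [List.all_eq_true]
    have hLq : s.length = q * N := by omega
    rw [← shift_iff_chunks s N q h1 hLq]
    constructor
    · intro h i hmi
      obtain ⟨hi1, hi2⟩ := PySem.List.mem_pyRange_one.mp hmi
      have hi0 : 0 ≤ i := le_trans (by exact_mod_cast Nat.zero_le N) hi1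
      have hiN : N ≤ i.toNat := by omega
      have hiL : i.toNat < s.length := by omega
      have := h i.toNat hiN hiL
      have hcast1 : PySem.List.pyGet? s i = s[i.toNat]? := by
        conv_lhs => rw [show i = ((i.toNat : Nat) : Int) by omega]
        rw [PySem.List.pyGet?_natCast]
      have hcast2 : PySem.List.pyGet? s (i - (N : Int)) = s[i.toNat - N]? := by
        conv_lhs => rw [show i - (N : Int) = ((i.toNat - N : Nat) : Int) by omega]
        rw [PySem.List.pyGet?_natCast]
      rw [hcast1, hcast2, this]
      simp
    · intro h i hiN hiL
      have hmi : ((i : Nat) : Int) ∈ PySem.List.pyRange (N : Int) (s.length : Int) 1 := by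
        rw [PySem.List.mem_pyRange_one]
        constructor
        · exact_mod_cast hiN
        · exact_mod_cast hiL
      have := h _ hmi
      rw [PySem.List.pyGet?_natCast, show ((i : Nat) : Int) - (N : Int) = ((i - N : Nat) : Int) by omega,
        PySem.List.pyGet?_natCast] at this
      exact eq_of_beq this
  · -- r ≠ 0 : both sides are false
    have : (((r : Nat) : Int) != 0) = true := by
      simp only [bne_iff_ne, ne_eq]
      intro h
      have : r = 0 := by exact_mod_cast h
      omega
    rw [if_neg (by omega : ¬ r = 0), this, if_pos rfl]
    simp only [Bool.false_eq_true, iff_false]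
    intro h
    have hCq2 : q + (if r = 0 then 0 else 1) = q + 1 := by rw [if_neg (by omega)]
    have hlast := h q (by omega)
    have hlen : ((s.drop (N * q)).take N).length = r := by
      rw [List.length_take, List.length_drop]
      omega
    rw [hlast, htk] at hlen
    omega

-- ===== VERDICT (by name: the statement is the Claim_ definition above) =====
theorem check_if_valid_spec : Claim_equal_check_if_valid := by
  intro value _ hpre
  unfold Spec_check_if_valid check_if_valid check_if_valid_alt
  simp only [counter_values_eq]
  set s := value.toList with hsdef
  have hfreqne : ((PySem.Set.ofList s).map (fun c => (s.count c : Int))) ≠ [] := by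
    intro hmapnil
    rw [List.map_eq_nil_iff] at hmapnil
    cases hsc : s with
    | nil => exact hpre hsc
    | cons a t =>
      have ha : a ∈ PySem.Set.ofList s := by
        rw [hsc]; exact (PySem.Set.mem_ofList _ _).mpr List.mem_cons_self
      rw [hmapnil] at ha
      exact absurd ha List.not_mem_nil
  rw [sorted_head_eq_min _ hfreqne]
  cases hmin : PySem.List.min? ((PySem.Set.ofList s).map (fun c => (s.count c : Int))) (fun x => x) with
  | none => exact absurd ((PySem.List.min?_eq_none_iff _ _).mp hmin) hfreqne
  | some m =>
    simp only []
    have hscan := scanRuns_eq_min s m hmin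
    rw [hscan]
    by_cases hm2 : m < 2
    · simp [hm2]
    · obtain ⟨c, _, hc⟩ := List.exists_of_mem_map (PySem.List.min?_mem hmin)
      have hMle : s.count c ≤ s.length := List.count_le_length
      have hc2 : 2 ≤ s.count c := by
        have : (2 : Int) ≤ (s.count c : Int) := by rw [hc]; omega
        exact_mod_cast this
      have hn : PySem.Int.floordiv ((s.length : Nat) : Int) m = ((s.length / s.count c : Nat) : Int) := by
        rw [← hc]
        exact_mod_cast PySem.Int.floordiv_natCast s.length (s.count c)
      have hN1 : 1 ≤ s.length / s.count c := (Nat.one_le_div_iff (by omega)).mpr hMle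
      have hN2 : s.length / s.count c ≤ s.length := Nat.div_le_self _ _
      simp only [hm2, if_false]
      rw [PySem.Str.len_eq, ← hsdef, hn]

      exact tail_eq s (s.length / s.count c) hN1 hN2
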